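-- pv_equiv track=rewrite | github.com/SamppaFIN/LegalInsights | Documents/Projects/Document search tool/software-factory/aurora-security-dojo/src/core/security_dojo.py | _assess_healing_impact
-- ===== SOURCE A (Python) =====
-- from typing import Dict, List, Optional, Any
--
-- def _assess_healing_impact(vulnerabilities: List[Dict[str, Any]]) -> str:
--     """
--     Assess the community healing impact of vulnerabilities found.
--
--     Args:
--         vulnerabilities: List of vulnerabilities found
--
--     Returns:
--         String describing the healing impact
--     """
--     if not vulnerabilities:
--         return "No vulnerabilities found - system is secure and serves community protection"
--
--     severity_count = {}
--     for vuln in vulnerabilities: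
--         severity = vuln.get('severity', 'unknown')
--         severity_count[severity] = severity_count.get(severity, 0) + 1
--
--     if severity_count.get('critical', 0) > 0:
--         return "Critical vulnerabilities found - immediate attention required for community protection"
--     elif severity_count.get('high', 0) > 0:
--         return "High-severity vulnerabilities found - prompt remediation needed for community safety"
--     elif severity_count.get('medium', 0) > 0:
--         return "Medium-severity vulnerabilities found - remediation recommended for community security"
--     else:
--         return "Low-severity vulnerabilities found - minor improvements recommended"
-- ===== SOURCE B (Python) =====
-- def _assess_healing_impact(vulnerabilities):
--     if not vulnerabilities:
--         return "No vulnerabilities found - system is secure and serves community protection"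
--     rank = {'critical': 3, 'high': 2, 'medium': 1}
--     worst = 0
--     for v in vulnerabilities:
--         worst = max(worst, rank.get(v.get('severity'), 0))
--     messages = [
--         "Low-severity vulnerabilities found - minor improvements recommended",
--         "Medium-severity vulnerabilities found - remediation recommended for community security",
--         "High-severity vulnerabilities found - prompt remediation needed for community safety",
--         "Critical vulnerabilities found - immediate attention required for community protection",
--     ]
--     return messages[worst]
-- ===== Notes on version B (the rewrite author's own statement) =====
-- stated objective: alternative
-- what changed: Replaces A's severity-count dict plus chained key lookups with a single-pass numeric accumulator: each vulnerability is mapped to a severity rank (critical=3, high=2, medium=1, else 0), the running maximum rank is kept, and the answer is read from a message table indexed by that maximum.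
import Mathlib
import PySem

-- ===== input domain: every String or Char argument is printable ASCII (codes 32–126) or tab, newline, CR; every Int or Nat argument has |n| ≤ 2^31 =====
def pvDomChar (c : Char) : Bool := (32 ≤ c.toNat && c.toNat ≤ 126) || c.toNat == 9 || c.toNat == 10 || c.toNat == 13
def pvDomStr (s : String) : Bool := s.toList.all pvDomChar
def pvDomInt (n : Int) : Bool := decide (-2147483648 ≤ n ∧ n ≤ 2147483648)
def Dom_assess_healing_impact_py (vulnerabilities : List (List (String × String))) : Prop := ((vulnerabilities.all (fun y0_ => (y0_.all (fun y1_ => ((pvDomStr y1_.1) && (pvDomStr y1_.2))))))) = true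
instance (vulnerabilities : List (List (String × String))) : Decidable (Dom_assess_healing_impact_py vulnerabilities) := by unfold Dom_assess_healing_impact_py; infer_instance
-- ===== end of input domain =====

-- ===== PORT A =====
-- B replaces A's severity-count dict and chained key lookups with a single-pass
-- max-rank accumulator plus a message table indexed by the worst rank (alternative decomposition).
def assess_healing_impact_py (vulnerabilities : List (List (String × String))) : String :=
  if vulnerabilities = [] then
    "No vulnerabilities found - system is secure and serves community protection"
  else
    let severity_count : PySem.Dict String Int :=
      vulnerabilities.foldl
        (fun d vuln =>
          let severity := (PySem.Dict.mk vuln).getD "severity" "unknown"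
          d.insert severity (d.getD severity 0 + 1))
        PySem.Dict.empty
    if severity_count.getD "critical" 0 > 0 then
      "Critical vulnerabilities found - immediate attention required for community protection"
    else if severity_count.getD "high" 0 > 0 then
      "High-severity vulnerabilities found - prompt remediation needed for community safety"
    else if severity_count.getD "medium" 0 > 0 then
      "Medium-severity vulnerabilities found - remediation recommended for community security"
    else
      "Low-severity vulnerabilities found - minor improvements recommended"

-- ===== PORT B =====
-- rank = {'critical': 3, 'high': 2, 'medium': 1}; keys are Optional strings since
-- Python looks the table up with v.get('severity'), which may be None.
def pvRankTable : PySem.Dict (Option String) Int :=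
  PySem.Dict.mk [(some "critical", 3), (some "high", 2), (some "medium", 1)]

def pvMessages : List String :=
  [ "Low-severity vulnerabilities found - minor improvements recommended",
    "Medium-severity vulnerabilities found - remediation recommended for community security",
    "High-severity vulnerabilities found - prompt remediation needed for community safety",
    "Critical vulnerabilities found - immediate attention required for community protection" ]

def assess_healing_impact_py_alt (vulnerabilities : List (List (String × String))) : String :=
  if vulnerabilities = [] then
    "No vulnerabilities found - system is secure and serves community protection"
  else
    let worst : Int :=
      vulnerabilities.foldl
        (fun w v => max w (pvRankTable.getD ((PySem.Dict.mk v).get? "severity") 0)) 0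
    -- messages[worst]: 0 ≤ worst ≤ 3 always, so the index is in range and getD's "" is never taken
    (PySem.List.pyGet? pvMessages worst).getD ""

-- ===== PRECONDITION & SPEC =====
def Spec_assess_healing_impact_py (vulnerabilities : List (List (String × String))) (out : String) : Prop := out = assess_healing_impact_py_alt vulnerabilities
instance (vulnerabilities : List (List (String × String))) (out : String) : Decidable (Spec_assess_healing_impact_py vulnerabilities out) := by unfold Spec_assess_healing_impact_py; infer_instance

-- ===== CLAIM =====
def Claim_equal_assess_healing_impact_py : Prop := ∀ (vulnerabilities : List (List (String × String))), Dom_assess_healing_impact_py vulnerabilities → Spec_assess_healing_impact_py vulnerabilities (assess_healing_impact_py vulnerabilities)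

-- ===== LEMMAS AND PROOFS =====

-- rank of a single vulnerability, in B's notation
def pvRk (v : List (String × String)) : Int :=
  pvRankTable.getD ((PySem.Dict.mk v).get? "severity") 0

theorem pvRk_eq (v : List (String × String)) :
    pvRk v =
      if (PySem.Dict.mk v).get? "severity" = some "critical" then 3
      else if (PySem.Dict.mk v).get? "severity" = some "high" then 2
      else if (PySem.Dict.mk v).get? "severity" = some "medium" then 1
      else 0 := by
  unfold pvRk pvRankTable
  generalize (PySem.Dict.mk v).get? "severity" = s
  simp only [PySem.Dict.getD, PySem.Dict.get?, List.find?]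
  by_cases h3 : s = some "critical"
  · simp [h3]
  · by_cases h2 : s = some "high"
    · simp [h2]
    · by_cases h1 : s = some "medium"
      · simp [h1, h2, h3]
      · have e3 : ((some "critical" : Option String) == s) = false := by
          simp [beq_eq_false_iff_ne, Ne.symm h3]
        have e2 : ((some "high" : Option String) == s) = false := by
          simp [beq_eq_false_iff_ne, Ne.symm h2]
        have e1 : ((some "medium" : Option String) == s) = false := by
          simp [beq_eq_false_iff_ne, Ne.symm h1]
        simp [e3, e2, e1, h3, h2, h1]

-- a foldl-max result is the initial value or an element of the list
theorem pv_foldl_max_eq_or_mem (l : List Int) (a : Int) :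
    l.foldl max a = a ∨ l.foldl max a ∈ l := by
  induction l generalizing a with
  | nil => left; rfl
  | cons x xs ih =>
    rcases ih (max a x) with h | h
    · rcases max_cases a x with ⟨he, _⟩ | ⟨he, _⟩
      · left; simpa [he] using h
      · right; simp only [List.foldl_cons]; rw [h, he]; simp
    · right; simp only [List.foldl_cons]; exact List.mem_cons_of_mem x h

-- B's accumulator is exactly the severity rank of the worst vulnerability present
theorem pv_worst_eq (vulns : List (List (String × String))) :
    (vulns.map pvRk).foldl max 0 =
      if ∃ v ∈ vulns, (PySem.Dict.mk v).get? "severity" = some "critical" then 3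
      else if ∃ v ∈ vulns, (PySem.Dict.mk v).get? "severity" = some "high" then 2
      else if ∃ v ∈ vulns, (PySem.Dict.mk v).get? "severity" = some "medium" then 1
      else 0 := by
  have hmem : ∀ x ∈ vulns.map pvRk, ∃ v ∈ vulns, x = pvRk v := by
    intro x hx
    obtain ⟨v, hv, he⟩ := List.mem_map.mp hx
    exact ⟨v, hv, he.symm⟩
  have hub := (PySem.List.le_foldl_max (vulns.map pvRk) 0).2
  have hcases := pv_foldl_max_eq_or_mem (vulns.map pvRk) 0
  split_ifs with h3 h2 h1
  · obtain ⟨v, hv, hc⟩ := h3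
    have hin : (3 : Int) ∈ vulns.map pvRk :=
      List.mem_map.mpr ⟨v, hv, by simp [pvRk_eq, hc]⟩
    have hge := hub 3 hin
    have hle : (vulns.map pvRk).foldl max 0 ≤ 3 := by
      rcases hcases with h | h
      · omega
      · obtain ⟨v', _, he⟩ := hmem _ h
        rw [he, pvRk_eq]; split_ifs <;> omega
    omega
  · obtain ⟨v, hv, hc⟩ := h2
    have hin : (2 : Int) ∈ vulns.map pvRk :=
      List.mem_map.mpr ⟨v, hv, by simp [pvRk_eq, hc]⟩
    have hge := hub 2 hin
    have hle : (vulns.map pvRk).foldl max 0 ≤ 2 := by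
      rcases hcases with h | h
      · omega
      · obtain ⟨v', hv', he⟩ := hmem _ h
        rw [he, pvRk_eq]
        split_ifs with c3
        · exact absurd ⟨v', hv', c3⟩ h3
        all_goals omega
    omega
  · obtain ⟨v, hv, hc⟩ := h1
    have hin : (1 : Int) ∈ vulns.map pvRk :=
      List.mem_map.mpr ⟨v, hv, by simp [pvRk_eq, hc]⟩
    have hge := hub 1 hin
    have hle : (vulns.map pvRk).foldl max 0 ≤ 1 := by
      rcases hcases with h | h
      · omega
      · obtain ⟨v', hv', he⟩ := hmem _ h
        rw [he, pvRk_eq]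
        split_ifs with c3 c2
        · exact absurd ⟨v', hv', c3⟩ h3
        · exact absurd ⟨v', hv', c2⟩ h2
        all_goals omega
    omega
  · rcases hcases with h | h
    · exact h
    · obtain ⟨v', hv', he⟩ := hmem _ h
      rw [he, pvRk_eq]
      split_ifs with c3 c2 c1
      · exact absurd ⟨v', hv', c3⟩ h3
      · exact absurd ⟨v', hv', c2⟩ h2
      · exact absurd ⟨v', hv', c1⟩ h1
      · rfl

-- A's `vuln.get('severity','unknown') == c` (for c ≠ "unknown") is `vuln.get('severity') == c`.
theorem pv_getD_eq_iff (v : List (String × String)) (c : String) (hc : c ≠ "unknown") :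
    (PySem.Dict.mk v).getD "severity" "unknown" = c ↔ (PySem.Dict.mk v).get? "severity" = some c := by
  rw [PySem.Dict.getD_eq_get?_getD]
  cases h : (PySem.Dict.mk v).get? "severity" with
  | none => simp [Ne.symm hc]
  | some w => simp

-- A's counter lookup for key c (c ≠ "unknown") tests existence of a vulnerability with that severity.
theorem pv_count_pos_iff_exists (vulns : List (List (String × String))) (c : String) (hc : c ≠ "unknown") :
    ((vulns.foldl
        (fun d vuln =>
          let severity := (PySem.Dict.mk vuln).getD "severity" "unknown"
          d.insert severity (d.getD severity 0 + 1))
        (PySem.Dict.empty : PySem.Dict String Int)).getD c 0 > 0)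
      ↔ (∃ v ∈ vulns, (PySem.Dict.mk v).get? "severity" = some c) := by
  have h1 : vulns.foldl
        (fun d vuln =>
          let severity := (PySem.Dict.mk vuln).getD "severity" "unknown"
          d.insert severity (d.getD severity 0 + 1))
        (PySem.Dict.empty : PySem.Dict String Int)
      = (vulns.map (fun v => (PySem.Dict.mk v).getD "severity" "unknown")).foldl
          (fun d x => d.insert x (d.getD x 0 + 1)) PySem.Dict.empty := by
    rw [List.foldl_map]
  rw [h1, PySem.Dict.getD_foldl_insert_add_one, PySem.Dict.getD_empty, zero_add]
  rw [gt_iff_lt,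
      show ((0 : Int) < ((vulns.map (fun v => (PySem.Dict.mk v).getD "severity" "unknown")).count c : Int))
        ↔ c ∈ vulns.map (fun v => (PySem.Dict.mk v).getD "severity" "unknown") by
      exact_mod_cast List.count_pos_iff]
  simp only [List.mem_map]
  constructor
  · rintro ⟨v, hv, he⟩
    exact ⟨v, hv, (pv_getD_eq_iff v c hc).mp he⟩
  · rintro ⟨v, hv, he⟩
    exact ⟨v, hv, (pv_getD_eq_iff v c hc).mpr he⟩

-- ===== VERDICT =====
theorem assess_healing_impact_py_spec : Claim_equal_assess_healing_impact_py := by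
  intro vulns _
  unfold Spec_assess_healing_impact_py assess_healing_impact_py assess_healing_impact_py_alt
  by_cases hnil : vulns = []
  · simp [hnil]
  · simp only [hnil, if_false]
    have hw : vulns.foldl
        (fun w v => max w (pvRankTable.getD ((PySem.Dict.mk v).get? "severity") 0)) 0
        = (vulns.map pvRk).foldl max 0 := by
      rw [List.foldl_map]; rfl
    rw [hw, pv_worst_eq,
        if_congr (pv_count_pos_iff_exists vulns "critical" (by decide)) rfl
          (if_congr (pv_count_pos_iff_exists vulns "high" (by decide)) rfl
            (if_congr (pv_count_pos_iff_exists vulns "medium" (by decide)) rfl rfl))]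
    split_ifs <;> decide
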